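-- pv_equiv track=rewrite | github.com/zippy731/unbender | unbender.py | is_edge_adjacent_to_path_edges
-- ===== SOURCE A (Python) =====
-- def is_edge_adjacent_to_path_edges(edge_key, face_idx, path, face_to_edges):
--     """
--     Check if an edge shares any vertices with edges already in the path
--     that are connected to this face.
--     """
--     # Get all vertices of the candidate edge
--     v1, v2 = edge_key
--     edge_verts = {v1, v2}
--
--     # Check all edges currently in the path that belong to this face
--     for path_edge in path["edges"]:
--         # If the edge is part of this face
--         if path_edge in face_to_edges[face_idx]:
--             # Get vertices of path edge
--             pv1, pv2 = path_edge
--             path_verts = {pv1, pv2}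
--
--             # If they share any vertices, they're adjacent
--             if edge_verts.intersection(path_verts):
--                 return True
--
--     return False
-- ===== SOURCE B (Python) =====
-- def is_edge_adjacent_to_path_edges(edge_key, face_idx, path, face_to_edges):
--     """Reverse traversal: scan this face's own edge list and report whether
--     some face edge is already on the path and touches an endpoint of the
--     candidate edge.  With nothing on the path yet, the answer is False."""
--     path_edges = path["edges"]
--     if not path_edges:
--         return False
--     return any(fe in path_edges and (fe[0] in edge_key or fe[1] in edge_key)
--                for fe in face_to_edges[face_idx])
-- ===== Notes on version B (the rewrite author's own statement) =====
-- stated objective: alternative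
-- what changed: A loops over the path's edges, testing each for membership in the face's edge list and early-returning on a vertex overlap; B loops over the face's edge list instead, asking for each face edge whether it is already among the path edges and touches the candidate's endpoints - the roles of the two lists in the scan and in the membership test are swapped.
import Mathlib
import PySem

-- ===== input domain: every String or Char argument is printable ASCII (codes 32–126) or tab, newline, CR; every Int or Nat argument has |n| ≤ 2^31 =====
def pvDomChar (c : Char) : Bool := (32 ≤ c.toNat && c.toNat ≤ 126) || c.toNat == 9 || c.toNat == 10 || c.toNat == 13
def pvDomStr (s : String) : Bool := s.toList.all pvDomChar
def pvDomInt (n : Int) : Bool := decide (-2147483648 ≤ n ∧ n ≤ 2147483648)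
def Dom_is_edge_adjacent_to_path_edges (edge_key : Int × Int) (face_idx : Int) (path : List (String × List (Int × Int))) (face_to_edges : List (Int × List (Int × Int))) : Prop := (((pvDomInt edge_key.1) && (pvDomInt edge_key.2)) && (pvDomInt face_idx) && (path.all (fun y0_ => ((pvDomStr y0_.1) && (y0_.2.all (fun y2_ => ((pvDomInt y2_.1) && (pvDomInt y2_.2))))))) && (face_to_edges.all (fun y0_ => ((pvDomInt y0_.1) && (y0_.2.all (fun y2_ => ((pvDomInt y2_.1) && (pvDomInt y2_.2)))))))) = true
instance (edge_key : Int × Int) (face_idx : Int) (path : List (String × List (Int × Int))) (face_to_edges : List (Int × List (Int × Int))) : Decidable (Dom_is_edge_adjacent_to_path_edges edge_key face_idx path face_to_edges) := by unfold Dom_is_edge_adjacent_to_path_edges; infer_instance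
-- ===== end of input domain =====

-- B reverses the scan: it loops over the face's edge list and tests each face edge for membership among the path edges (alternative decomposition; no speed claim).
-- ===== PORT A =====
-- A's per-path-edge scan: membership in this face's edge list, vertex-set intersection, early return
def pvAScan (edge_key : Int × Int) (face_idx : Int) (face_to_edges : List (Int × List (Int × Int))) : List (Int × Int) → Bool
  | [] => false
  | path_edge :: rest =>
    match (PySem.Dict.mk face_to_edges).get? face_idx with
    | none => false  -- KeyError in Python; excluded by Pre_
    | some fes =>
      if fes.contains path_edge then
        if !(PySem.Set.inter (PySem.Set.ofList [edge_key.1, edge_key.2]) (PySem.Set.ofList [path_edge.1, path_edge.2])).isEmpty then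
          true
        else pvAScan edge_key face_idx face_to_edges rest
      else pvAScan edge_key face_idx face_to_edges rest

def is_edge_adjacent_to_path_edges (edge_key : Int × Int) (face_idx : Int) (path : List (String × List (Int × Int))) (face_to_edges : List (Int × List (Int × Int))) : Bool :=
  match (PySem.Dict.mk path).get? "edges" with
  | none => false  -- KeyError in Python; excluded by Pre_
  | some edges => pvAScan edge_key face_idx face_to_edges edges

-- ===== PORT B =====
def is_edge_adjacent_to_path_edges_alt (edge_key : Int × Int) (face_idx : Int) (path : List (String × List (Int × Int))) (face_to_edges : List (Int × List (Int × Int))) : Bool :=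
  match (PySem.Dict.mk path).get? "edges" with
  | none => false  -- KeyError in Python; excluded by Pre_
  | some path_edges =>
    if path_edges.isEmpty then false
    else
      match (PySem.Dict.mk face_to_edges).get? face_idx with
      | none => false  -- KeyError in Python; excluded by Pre_
      | some fes =>
        fes.any (fun fe =>
          path_edges.contains fe &&
          ((fe.1 == edge_key.1 || fe.1 == edge_key.2) || (fe.2 == edge_key.1 || fe.2 == edge_key.2)))

-- ===== PRECONDITION & SPEC =====
-- Pre_ excludes exactly the inputs where Python A raises KeyError: path must have the
-- "edges" key, and if that list is nonempty face_idx must be a key of face_to_edges.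
def Pre_is_edge_adjacent_to_path_edges (edge_key : Int × Int) (face_idx : Int) (path : List (String × List (Int × Int))) (face_to_edges : List (Int × List (Int × Int))) : Prop :=
  ((PySem.Dict.mk path).get? "edges").isSome = true ∧
  (((PySem.Dict.mk path).get? "edges").getD [] ≠ [] → ((PySem.Dict.mk face_to_edges).get? face_idx).isSome = true)
instance (edge_key : Int × Int) (face_idx : Int) (path : List (String × List (Int × Int))) (face_to_edges : List (Int × List (Int × Int))) : Decidable (Pre_is_edge_adjacent_to_path_edges edge_key face_idx path face_to_edges) := by unfold Pre_is_edge_adjacent_to_path_edges; infer_instance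

def pvWitness_is_edge_adjacent_to_path_edges : (Int × Int) × Int × (List (String × List (Int × Int))) × (List (Int × List (Int × Int))) :=
  ((1, 2), 0, [("edges", [(2, 3)])], [(0, [(2, 3)])])

def Spec_is_edge_adjacent_to_path_edges (edge_key : Int × Int) (face_idx : Int) (path : List (String × List (Int × Int))) (face_to_edges : List (Int × List (Int × Int))) (out : Bool) : Prop := out = is_edge_adjacent_to_path_edges_alt edge_key face_idx path face_to_edges
instance (edge_key : Int × Int) (face_idx : Int) (path : List (String × List (Int × Int))) (face_to_edges : List (Int × List (Int × Int))) (out : Bool) : Decidable (Spec_is_edge_adjacent_to_path_edges edge_key face_idx path face_to_edges out) := by unfold Spec_is_edge_adjacent_to_path_edges; infer_instance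

-- ===== CLAIM (what is proved, stated in full; the proofs are below) =====
def Claim_equal_is_edge_adjacent_to_path_edges : Prop := ∀ (edge_key : Int × Int) (face_idx : Int) (path : List (String × List (Int × Int))) (face_to_edges : List (Int × List (Int × Int))), Dom_is_edge_adjacent_to_path_edges edge_key face_idx path face_to_edges → Pre_is_edge_adjacent_to_path_edges edge_key face_idx path face_to_edges → Spec_is_edge_adjacent_to_path_edges edge_key face_idx path face_to_edges (is_edge_adjacent_to_path_edges edge_key face_idx path face_to_edges)

-- ===== LEMMAS AND PROOFS =====

-- A's vertex-set intersection test equals B's four endpoint comparisons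
theorem pvShare_eq (ek pe : Int × Int) :
    (!(PySem.Set.inter (PySem.Set.ofList [ek.1, ek.2]) (PySem.Set.ofList [pe.1, pe.2])).isEmpty)
      = ((pe.1 == ek.1 || pe.1 == ek.2) || (pe.2 == ek.1 || pe.2 == ek.2)) := by
  rw [Bool.eq_iff_iff, Bool.not_eq_true', List.isEmpty_eq_false_iff]
  constructor
  · intro hne
    obtain ⟨x, hx⟩ := List.exists_mem_of_ne_nil _ hne
    obtain ⟨hx1, hx2⟩ := (PySem.Set.mem_inter _ _ _).mp hx
    rw [PySem.Set.mem_ofList] at hx1 hx2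
    simp only [List.mem_cons, List.not_mem_nil, or_false] at hx1 hx2
    simp only [Bool.or_eq_true, beq_iff_eq]
    rcases hx1 with h1 | h1 <;> rcases hx2 with h2 | h2 <;> rw [h1] at h2 <;> tauto
  · intro hb
    simp only [Bool.or_eq_true, beq_iff_eq] at hb
    rcases hb with (h | h) | (h | h)
    · exact List.ne_nil_of_mem ((PySem.Set.mem_inter _ _ pe.1).mpr
        ⟨(PySem.Set.mem_ofList _ pe.1).mpr (by simp [h]), (PySem.Set.mem_ofList _ pe.1).mpr (by simp)⟩)
    · exact List.ne_nil_of_mem ((PySem.Set.mem_inter _ _ pe.1).mpr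
        ⟨(PySem.Set.mem_ofList _ pe.1).mpr (by simp [h]), (PySem.Set.mem_ofList _ pe.1).mpr (by simp)⟩)
    · exact List.ne_nil_of_mem ((PySem.Set.mem_inter _ _ pe.2).mpr
        ⟨(PySem.Set.mem_ofList _ pe.2).mpr (by simp [h]), (PySem.Set.mem_ofList _ pe.2).mpr (by simp)⟩)
    · exact List.ne_nil_of_mem ((PySem.Set.mem_inter _ _ pe.2).mpr
        ⟨(PySem.Set.mem_ofList _ pe.2).mpr (by simp [h]), (PySem.Set.mem_ofList _ pe.2).mpr (by simp)⟩)

-- A's scan, once the face lookup is fixed, is an `any` over the path edges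
theorem pvAScan_eq_any (ek : Int × Int) (fi : Int) (fte : List (Int × List (Int × Int)))
    (fes : List (Int × Int)) (hfe : (PySem.Dict.mk fte).get? fi = some fes) :
    ∀ edges : List (Int × Int),
      pvAScan ek fi fte edges
        = edges.any (fun pe => fes.contains pe &&
            ((pe.1 == ek.1 || pe.1 == ek.2) || (pe.2 == ek.1 || pe.2 == ek.2)))
  | [] => rfl
  | pe :: rest => by
    simp only [pvAScan, hfe, List.any_cons]
    rw [pvShare_eq ek pe, pvAScan_eq_any ek fi fte fes hfe rest]
    by_cases hm : pe ∈ fes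
    · by_cases hs : ((pe.1 == ek.1 || pe.1 == ek.2) || (pe.2 == ek.1 || pe.2 == ek.2)) = true <;>
        simp [hm, hs]
    · simp [hm]

-- swapping which list is scanned and which is membership-tested preserves `any`
theorem pvAny_swap (l1 l2 : List (Int × Int)) (p : (Int × Int) → Bool) :
    l1.any (fun x => l2.contains x && p x) = l2.any (fun x => l1.contains x && p x) := by
  rw [Bool.eq_iff_iff]
  simp only [List.any_eq_true, Bool.and_eq_true, List.contains_eq_mem, decide_eq_true_eq]
  exact ⟨fun ⟨x, h1, h2, hp⟩ => ⟨x, h2, h1, hp⟩, fun ⟨x, h1, h2, hp⟩ => ⟨x, h2, h1, hp⟩⟩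

-- ===== VERDICT (by name: the statement is the Claim_ definition above) =====
theorem is_edge_adjacent_to_path_edges_spec : Claim_equal_is_edge_adjacent_to_path_edges := by
  intro ek fi path fte _ hpre
  unfold Spec_is_edge_adjacent_to_path_edges is_edge_adjacent_to_path_edges is_edge_adjacent_to_path_edges_alt
  cases h : (PySem.Dict.mk path).get? "edges" with
  | none => rfl
  | some edges =>
    cases edges with
    | nil => simp [pvAScan]
    | cons e rest =>
      have hne : ((PySem.Dict.mk path).get? "edges").getD [] ≠ [] := by simp [h]
      obtain ⟨fes, hfe⟩ := Option.isSome_iff_exists.mp (hpre.2 hne)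
      dsimp only
      rw [pvAScan_eq_any ek fi fte fes hfe (e :: rest), hfe]
      simp only [List.isEmpty_cons, Bool.false_eq_true, if_false]
      exact pvAny_swap (e :: rest) fes _
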